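-- pv_equiv track=rewrite | github.com/bharath13211/Pikachu | pikachu.py | move_B_left
-- ===== SOURCE A (Python) =====
-- import copy
--
-- def move_B_left(board, player, N, r, c):
--     temp_board = copy.deepcopy(board)
--     if r < N and r >= 0 and c < N - 2 and c >= 0 and temp_board[r][c] == 'B':
--         for j in range(c + 1, N-1):
--             if (temp_board[r][j] == 'w' or temp_board[r][j] == 'W') and temp_board[r][j + 1] == '.':
--                 list = []
--                 for k in range(c + 1, j):
--                     if temp_board[r][k] == 'b' or temp_board[r][k] == 'B':
--                         list.append('N')
--                     elif temp_board[r][k] == '.':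
--                         list.append('Y')
--                 if 'N' not in list:
--                     temp_board[r][j + 1] = 'B'
--                     temp_board[r][j] = '.'
--                     temp_board[r][c] = '.'
--     return temp_board
-- ===== SOURCE B (Python) =====
-- def move_B_left(board, player, N, r, c):
--     # Single O(N) pass over row r with a running "blocker seen" flag; only row r is rebuilt.
--     if not (0 <= r < N and 0 <= c < N - 2):
--         return [row[:] for row in board]
--     row = board[r]
--     if row[c] != 'B':
--         return [row[:] for row in board]
--     new_row = list(row)
--     blocked = False
--     j = c + 1
--     while j < N - 1:
--         cell = row[j]
--         if (cell == 'w' or cell == 'W') and row[j + 1] == '.' and not blocked: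
--             new_row[j + 1] = 'B'
--             new_row[j] = '.'
--             new_row[c] = '.'
--             break
--         if cell == 'b' or cell == 'B':
--             blocked = True
--         j += 1
--     return [new_row if i == r else rr[:] for i, rr in enumerate(board)]
-- ===== Notes on version B (the rewrite author's own statement) =====
-- stated objective: faster
-- what changed: A rescans row[c+1..j) for a blocker at every candidate column j (nested loops over a deep-copied board); B makes one left-to-right pass over row r with a running 'b/B seen' flag, stops at the first landable square, and rebuilds only row r.
import Mathlib
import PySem

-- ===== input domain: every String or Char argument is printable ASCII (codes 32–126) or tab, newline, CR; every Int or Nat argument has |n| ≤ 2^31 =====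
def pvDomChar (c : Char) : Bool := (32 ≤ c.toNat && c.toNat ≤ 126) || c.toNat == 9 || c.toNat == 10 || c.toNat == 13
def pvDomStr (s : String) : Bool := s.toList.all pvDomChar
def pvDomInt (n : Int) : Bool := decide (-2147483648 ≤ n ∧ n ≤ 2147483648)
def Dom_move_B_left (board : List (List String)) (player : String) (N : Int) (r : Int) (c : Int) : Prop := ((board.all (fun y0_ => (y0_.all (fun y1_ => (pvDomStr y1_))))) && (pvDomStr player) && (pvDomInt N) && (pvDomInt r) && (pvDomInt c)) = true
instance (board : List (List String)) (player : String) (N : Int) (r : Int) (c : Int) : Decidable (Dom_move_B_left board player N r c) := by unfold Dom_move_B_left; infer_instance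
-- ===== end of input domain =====

-- B replaces A's nested rescans (inner b/B-scan per candidate square) by a single left-to-right
-- pass over row r with a running "blocker seen" flag, rebuilding only row r (objective: faster, O(N) vs O(N^2)).

-- ===== PORT A =====
-- temp_board[r][j] = v  (Python raises IndexError out of range; such inputs are outside Pre_)
def pvSetCell (tb : List (List String)) (r j : Int) (v : String) : List (List String) :=
  tb.set r.toNat ((PySem.List.pyGetD tb r []).set j.toNat v)

-- the inner 'list' built by A's for-k loop over range(c+1, j)
def pvScan (row : List String) (a b : Int) : List String :=
  (PySem.List.pyRange a b 1).foldl (fun acc k =>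
    if PySem.List.pyGetD row k "" = "b" ∨ PySem.List.pyGetD row k "" = "B" then acc ++ ["N"]
    else if PySem.List.pyGetD row k "" = "." then acc ++ ["Y"] else acc) []

-- body of A's for-j loop (temp_board is the mutable state)
def pvAStep (r c : Int) (tb : List (List String)) (j : Int) : List (List String) :=
  let row := PySem.List.pyGetD tb r []
  if (PySem.List.pyGetD row j "" = "w" ∨ PySem.List.pyGetD row j "" = "W") ∧
      PySem.List.pyGetD row (j + 1) "" = "." then
    if "N" ∉ pvScan row (c + 1) j then
      pvSetCell (pvSetCell (pvSetCell tb r (j + 1) "B") r j ".") r c "."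
    else tb
  else tb

def move_B_left (board : List (List String)) (player : String) (N : Int) (r : Int) (c : Int) : List (List String) :=
  let temp_board := board  -- copy.deepcopy: value copy
  if r < N ∧ 0 ≤ r ∧ c < N - 2 ∧ 0 ≤ c ∧
      PySem.List.pyGetD (PySem.List.pyGetD temp_board r []) c "" = "B" then
    (PySem.List.pyRange (c + 1) (N - 1) 1).foldl (pvAStep r c) temp_board
  else temp_board

-- ===== PORT B =====
-- body of B's while loop; state = (new_row, blocked, done); done = true models Python's `break`
def pvBStep (row : List String) (c : Int) (st : List String × Bool × Bool) (j : Int) :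
    List String × Bool × Bool :=
  if st.2.2 then st
  else
    let cell := PySem.List.pyGetD row j ""
    if (cell = "w" ∨ cell = "W") ∧ PySem.List.pyGetD row (j + 1) "" = "." ∧ st.2.1 = false then
      (((st.1.set (j + 1).toNat "B").set j.toNat ".").set c.toNat ".", st.2.1, true)
    else if cell = "b" ∨ cell = "B" then (st.1, true, st.2.2)
    else st

def move_B_left_alt (board : List (List String)) (player : String) (N : Int) (r : Int) (c : Int) : List (List String) :=
  if 0 ≤ r ∧ r < N ∧ 0 ≤ c ∧ c < N - 2 then
    let row := PySem.List.pyGetD board r []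
    if PySem.List.pyGetD row c "" = "B" then
      let st := (PySem.List.pyRange (c + 1) (N - 1) 1).foldl (pvBStep row c) (row, false, false)
      board.set r.toNat st.1   -- rebuild: only row r replaced
    else board
  else board

-- ===== PRECONDITION & SPEC =====
-- Pre_ excludes exactly the inputs on which Python A raises IndexError: when the guard passes it
-- needs r, c in range, and (when the piece is a 'B') the row long enough that the scan to column
-- N-2 — and the j+1 lookup short-circuit-reached only behind a 'w'/'W' — stays in range.
def Pre_move_B_left (board : List (List String)) (player : String) (N : Int) (r : Int) (c : Int) : Prop :=
  (0 ≤ r ∧ r < N ∧ 0 ≤ c ∧ c < N - 2) →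
    (r < (board.length : Int) ∧
     c < ((PySem.List.pyGetD board r []).length : Int) ∧
     (PySem.List.pyGetD (PySem.List.pyGetD board r []) c "" = "B" →
       (N ≤ ((PySem.List.pyGetD board r []).length : Int) ∨
        (((PySem.List.pyGetD board r []).length : Int) = N - 1 ∧
         ¬(PySem.List.pyGetD (PySem.List.pyGetD board r []) (N - 2) "" = "w" ∨
           PySem.List.pyGetD (PySem.List.pyGetD board r []) (N - 2) "" = "W")))))
instance (board : List (List String)) (player : String) (N : Int) (r : Int) (c : Int) : Decidable (Pre_move_B_left board player N r c) := by unfold Pre_move_B_left; infer_instance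

def pvWitness_move_B_left : List (List String) × String × Int × Int × Int :=
  ([["B", "w", "."]], "p", 3, 0, 0)

def Spec_move_B_left (board : List (List String)) (player : String) (N : Int) (r : Int) (c : Int) (out : List (List String)) : Prop := out = move_B_left_alt board player N r c
instance (board : List (List String)) (player : String) (N : Int) (r : Int) (c : Int) (out : List (List String)) : Decidable (Spec_move_B_left board player N r c out) := by unfold Spec_move_B_left; infer_instance

-- ===== CLAIM (what is proved, stated in full; the proofs are below) =====
def Claim_equal_move_B_left : Prop := ∀ (board : List (List String)) (player : String) (N : Int) (r : Int) (c : Int), Dom_move_B_left board player N r c → Pre_move_B_left board player N r c → Spec_move_B_left board player N r c (move_B_left board player N r c)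

-- ===== LEMMAS AND PROOFS =====

lemma pvGetD_nonneg {α : Type} (xs : List α) (i : Int) (d : α) (h : 0 ≤ i) :
    PySem.List.pyGetD xs i d = xs.getD i.toNat d := by
  simp only [PySem.List.pyGetD, PySem.List.pyGet?, PySem.List.pyIdx?, h, if_true]
  by_cases hlt : i < (xs.length : Int)
  · simp [hlt, List.getD]
  · have : xs.length ≤ i.toNat := by omega
    simp [hlt, List.getD, List.getElem?_eq_none this]

lemma pvGetD_lt {α : Type} (xs : List α) (i : Int) (d : α) (h0 : 0 ≤ i)
    (h : PySem.List.pyGetD xs i d ≠ d) : i.toNat < xs.length := by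
  by_contra hge
  rw [pvGetD_nonneg xs i d h0] at h
  exact h (List.getD_eq_default _ _ (by omega))

lemma pvGetD_set_self (tb : List (List String)) (r : Int) (x : List String)
    (h0 : 0 ≤ r) (hr : r.toNat < tb.length) :
    PySem.List.pyGetD (tb.set r.toNat x) r [] = x := by
  rw [pvGetD_nonneg _ _ _ h0]
  simp [List.getD, List.getElem?_set_self (by simpa using hr)]

lemma pvBdone (row : List String) (c : Int) (L : List Int) (st : List String × Bool × Bool)
    (h : st.2.2 = true) : L.foldl (pvBStep row c) st = st := by
  induction L with
  | nil => rfl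
  | cons x xs ih =>
    rw [List.foldl_cons, show pvBStep row c st x = st by simp [pvBStep, h]]
    exact ih

lemma pvScanAux (row : List String) (L : List Int) (acc : List String) :
    ("N" ∈ L.foldl (fun acc k =>
        if PySem.List.pyGetD row k "" = "b" ∨ PySem.List.pyGetD row k "" = "B" then acc ++ ["N"]
        else if PySem.List.pyGetD row k "" = "." then acc ++ ["Y"] else acc) acc) ↔
      ("N" ∈ acc ∨ ∃ k ∈ L,
        (PySem.List.pyGetD row k "" = "b" ∨ PySem.List.pyGetD row k "" = "B")) := by
  induction L generalizing acc with
  | nil => simp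
  | cons x xs ih =>
    rw [List.foldl_cons]
    by_cases h1 : PySem.List.pyGetD row x "" = "b" ∨ PySem.List.pyGetD row x "" = "B"
    · rw [if_pos h1, ih]
      exact ⟨fun _ => Or.inr ⟨x, List.mem_cons_self, h1⟩, fun _ => Or.inl (by simp)⟩
    · rw [if_neg h1]
      by_cases h2 : PySem.List.pyGetD row x "" = "."
      · rw [if_pos h2, ih]
        constructor
        · rintro (hm | ⟨k, hk, hb⟩)
          · rcases List.mem_append.1 hm with hm | hm
            · exact Or.inl hm
            · exact absurd (List.mem_singleton.1 hm) (by decide)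
          · exact Or.inr ⟨k, List.mem_cons_of_mem _ hk, hb⟩
        · rintro (hm | ⟨k, hk, hb⟩)
          · exact Or.inl (List.mem_append.2 (Or.inl hm))
          · rcases List.mem_cons.1 hk with hk | hk
            · exact absurd (hk ▸ hb) h1
            · exact Or.inr ⟨k, hk, hb⟩
      · rw [if_neg h2, ih]
        constructor
        · rintro (hm | ⟨k, hk, hb⟩)
          · exact Or.inl hm
          · exact Or.inr ⟨k, List.mem_cons_of_mem _ hk, hb⟩
        · rintro (hm | ⟨k, hk, hb⟩)
          · exact Or.inl hm
          · rcases List.mem_cons.1 hk with hk | hk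
            · exact absurd (hk ▸ hb) h1
            · exact Or.inr ⟨k, hk, hb⟩

lemma pvScan_memN (row : List String) (a b : Int) :
    ("N" ∈ pvScan row a b) ↔
      ∃ k, a ≤ k ∧ k < b ∧
        (PySem.List.pyGetD row k "" = "b" ∨ PySem.List.pyGetD row k "" = "B") := by
  rw [pvScan, pvScanAux]
  simp only [List.not_mem_nil, false_or]
  constructor
  · rintro ⟨k, hk, h⟩
    rw [PySem.List.mem_pyRange_one] at hk
    exact ⟨k, hk.1, hk.2, h⟩
  · rintro ⟨k, h1, h2, h⟩
    exact ⟨k, PySem.List.mem_pyRange_one.2 ⟨h1, h2⟩, h⟩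

-- after A's move at column j0 (new 'B' at j0+1) every later loop iteration is a no-op
lemma pvPost (r c j0 : Int) (tb0 : List (List String)) (hj0 : c + 1 ≤ j0)
    (hB : PySem.List.pyGetD (PySem.List.pyGetD tb0 r []) (j0 + 1) "" = "B") :
    ∀ L : List Int, (∀ x ∈ L, j0 < x) → L.foldl (pvAStep r c) tb0 = tb0 := by
  intro L
  induction L with
  | nil => intro _; rfl
  | cons x xs ih =>
    intro h
    have hx : j0 < x := h x List.mem_cons_self
    have hstep : pvAStep r c tb0 x = tb0 := by
      unfold pvAStep
      by_cases hbase : (PySem.List.pyGetD (PySem.List.pyGetD tb0 r []) x "" = "w" ∨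
          PySem.List.pyGetD (PySem.List.pyGetD tb0 r []) x "" = "W") ∧
          PySem.List.pyGetD (PySem.List.pyGetD tb0 r []) (x + 1) "" = "."
      · have hx2 : j0 + 1 < x := by
          rcases lt_or_ge (j0 + 1) x with h' | h'
          · exact h'
          · have hxe : x = j0 + 1 := by omega
            rw [hxe] at hbase
            rcases hbase.1 with hw | hw <;> rw [hB] at hw <;> simp at hw
        have hmem : "N" ∈ pvScan (PySem.List.pyGetD tb0 r []) (c + 1) x :=
          (pvScan_memN _ _ _).2 ⟨j0 + 1, by omega, by omega, Or.inr hB⟩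
        simp [hbase, hmem]
      · simp [hbase]
    rw [List.foldl_cons, hstep]
    exact ih (fun y hy => h y (List.mem_cons_of_mem _ hy))

-- main invariant: before any move A's board is untouched and B's flag records "b/B seen in row[c+1..j)"
lemma pvMain (board : List (List String)) (r c N : Int) (row : List String)
    (hr : 0 ≤ r) (hc : 0 ≤ c)
    (hrow : PySem.List.pyGetD board r [] = row)
    (hrlen : r.toNat < board.length) :
    ∀ (n : Nat) (j : Int) (blocked : Bool),
      (N - 1 - j).toNat = n → c + 1 ≤ j →
      (blocked = true ↔ ∃ k, c + 1 ≤ k ∧ k < j ∧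
        (PySem.List.pyGetD row k "" = "b" ∨ PySem.List.pyGetD row k "" = "B")) →
      (PySem.List.pyRange j (N - 1) 1).foldl (pvAStep r c) board
        = board.set r.toNat
            ((PySem.List.pyRange j (N - 1) 1).foldl (pvBStep row c) (row, blocked, false)).1 := by
  intro n
  induction n with
  | zero =>
    intro j blocked hn _ _
    rw [PySem.List.pyRange_one_eq_nil (by omega)]
    simp only [List.foldl_nil]
    have hget : board[r.toNat] = row := by
      have h1 := pvGetD_nonneg board r [] hr
      rw [hrow] at h1
      simpa [List.getD, List.getElem?_eq_getElem hrlen] using h1.symm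
    rw [← hget]
    exact (List.set_getElem_self hrlen).symm
  | succ n ihn =>
    intro j blocked hn hcj hblk
    have hjN : j < N - 1 := by clear hblk ihn; omega
    have hn' : (N - 1 - (j + 1)).toNat = n := by clear hblk ihn; omega
    rw [PySem.List.pyRange_one_cons hjN, List.foldl_cons, List.foldl_cons]
    by_cases hbase : (PySem.List.pyGetD row j "" = "w" ∨ PySem.List.pyGetD row j "" = "W") ∧
        PySem.List.pyGetD row (j + 1) "" = "."
    · by_cases hb : blocked = true
      · -- blocked: A's inner scan finds an 'N', B's flag suppresses the move; both states unchanged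
        have hmem : "N" ∈ pvScan row (c + 1) j := by
          obtain ⟨k, hk1, hk2, hk3⟩ := hblk.1 hb
          exact (pvScan_memN _ _ _).2 ⟨k, hk1, hk2, hk3⟩
        have hA : pvAStep r c board j = board := by
          unfold pvAStep
          rw [hrow]
          simp [hbase, hmem]
        have hcell : ¬(PySem.List.pyGetD row j "" = "b" ∨ PySem.List.pyGetD row j "" = "B") := by
          rcases hbase.1 with hw | hw <;> rw [hw] <;> simp
        have hBst : pvBStep row c (row, blocked, false) j = (row, blocked, false) := by
          simp [pvBStep, hb, hcell]
        rw [hA, hBst]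
        exact ihn (j + 1) blocked hn' (by omega)
          ⟨fun h => (hblk.1 h).imp (fun k hk => ⟨hk.1, by omega, hk.2.2⟩), fun _ => hb⟩
      · -- unblocked move: A rewrites three cells of board, B rewrites the same three cells of its row copy
        have hb' : blocked = false := by cases blocked <;> simp_all
        have hnoN : "N" ∉ pvScan row (c + 1) j := by
          rw [pvScan_memN]
          rintro ⟨k, hk1, hk2, hk3⟩
          exact hb (hblk.2 ⟨k, hk1, hk2, hk3⟩)
        have hj1len : (j + 1).toNat < row.length :=
          pvGetD_lt row (j + 1) "" (by omega) (by rw [hbase.2]; simp)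
        have hA : pvAStep r c board j =
            board.set r.toNat (((row.set (j + 1).toNat "B").set j.toNat ".").set c.toNat ".") := by
          unfold pvAStep
          rw [hrow, if_pos hbase, if_pos hnoN]
          unfold pvSetCell
          rw [hrow, pvGetD_set_self _ _ _ hr hrlen, List.set_set,
            pvGetD_set_self _ _ _ hr (by simpa using hrlen), List.set_set]
        have hBst : pvBStep row c (row, blocked, false) j =
            ((((row.set (j + 1).toNat "B").set j.toNat ".").set c.toNat "."), blocked, true) := by
          simp [pvBStep, hbase, hb']
        rw [hA, hBst, pvBdone _ _ _ _ rfl]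
        apply pvPost r c j _ hcj
        · rw [pvGetD_set_self _ _ _ hr (by simpa using hrlen),
            pvGetD_nonneg _ _ _ (by omega : (0:Int) ≤ j + 1)]
          have hne1 : c.toNat ≠ (j + 1).toNat := by omega
          have hne2 : j.toNat ≠ (j + 1).toNat := by omega
          simp [List.getD, List.getElem?_set_ne hne1, List.getElem?_set_ne hne2,
            List.getElem?_set_self hj1len]
        · intro x hx
          rw [PySem.List.mem_pyRange_one] at hx
          omega
    · -- no candidate square at j: A's outer if fails; B at most raises its blocker flag
      have hA : pvAStep r c board j = board := by
        unfold pvAStep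
        rw [hrow]
        simp [hbase]
      have hnot : ¬((PySem.List.pyGetD row j "" = "w" ∨ PySem.List.pyGetD row j "" = "W") ∧
          PySem.List.pyGetD row (j + 1) "" = "." ∧ blocked = false) := by
        intro h; exact hbase ⟨h.1, h.2.1⟩
      rw [hA]
      by_cases hcell : PySem.List.pyGetD row j "" = "b" ∨ PySem.List.pyGetD row j "" = "B"
      · have hBst : pvBStep row c (row, blocked, false) j = (row, true, false) := by
          simp [pvBStep, hnot, hcell]
        rw [hBst]
        exact ihn (j + 1) true hn' (by omega)
          ⟨fun _ => ⟨j, hcj, by omega, hcell⟩, fun _ => rfl⟩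
      · have hBst : pvBStep row c (row, blocked, false) j = (row, blocked, false) := by
          simp [pvBStep, hnot, hcell]
        rw [hBst]
        refine ihn (j + 1) blocked hn' (by omega) ⟨?_, ?_⟩
        · intro h
          exact (hblk.1 h).imp (fun k hk => ⟨hk.1, by omega, hk.2.2⟩)
        · rintro ⟨k, hk1, hk2, hk3⟩
          refine hblk.2 ⟨k, hk1, ?_, hk3⟩
          rcases lt_or_ge k j with h' | h'
          · exact h'
          · rw [show k = j by omega] at hk3
            exact absurd hk3 hcell

-- ===== VERDICT (by name: the statement is the Claim_ definition above) =====
theorem move_B_left_spec : Claim_equal_move_B_left := by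
  intro board player N r c _ _
  unfold Spec_move_B_left move_B_left move_B_left_alt
  by_cases hg : 0 ≤ r ∧ r < N ∧ 0 ≤ c ∧ c < N - 2
  · obtain ⟨hr, hrN, hc, hcN⟩ := hg
    simp only [hr, hrN, hc, hcN, and_true, true_and, if_true]
    by_cases hcell : PySem.List.pyGetD (PySem.List.pyGetD board r []) c "" = "B"
    · simp only [hcell, if_true, hr, hrN, hc, hcN, and_true, true_and]
      have hclen : c.toNat < (PySem.List.pyGetD board r []).length :=
        pvGetD_lt _ c "" hc (by rw [hcell]; simp)
      have hrlen : r.toNat < board.length := by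
        apply pvGetD_lt board r [] hr
        intro h
        rw [h] at hclen
        simp at hclen
      rw [pvMain board r c N (PySem.List.pyGetD board r []) hr hc rfl hrlen
        ((N - 1 - (c + 1)).toNat) (c + 1) false rfl (le_refl _)
        ⟨by simp, by rintro ⟨k, hk1, hk2, _⟩; omega⟩]
    · simp [hcell, hr, hrN, hc, hcN]
  · have hng : ¬(r < N ∧ 0 ≤ r ∧ c < N - 2 ∧ 0 ≤ c ∧
        PySem.List.pyGetD (PySem.List.pyGetD board r []) c "" = "B") := by tauto
    simp only [hng, if_false, if_neg hg]
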